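-- pv_equiv track=rewrite | github.com/ChopinNo3Op9/Coding-Challenge | alternate upper lower string.py | interval_case
-- ===== SOURCE A (Python) =====
-- def interval_case(input_str):
--     result = []
--     is_upper = True
--
--     for char in input_str:
--         if char.isalpha():
--             if is_upper:
--                 result.append(char.upper())
--             else:
--                 result.append(char.lower())
--             is_upper = not is_upper
--         else:
--             result.append(char)
--
--     return ''.join(result)
-- ===== SOURCE B (Python) =====
-- def interval_case(input_str):
--     alphas = [c for c in input_str if c.isalpha()]
--     styled = (c.upper() if k % 2 == 0 else c.lower() for k, c in enumerate(alphas))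
--     return ''.join(next(styled) if c.isalpha() else c for c in input_str)
-- ===== Notes on version B (the rewrite author's own statement) =====
-- stated objective: alternative
-- what changed: Replaces the fused single-pass case-toggle with a two-pass shape: first collect the alphabetic subsequence and style it by its own even/odd position, then merge the styled stream back into the original string, skipping non-alpha characters.
import Mathlib
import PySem

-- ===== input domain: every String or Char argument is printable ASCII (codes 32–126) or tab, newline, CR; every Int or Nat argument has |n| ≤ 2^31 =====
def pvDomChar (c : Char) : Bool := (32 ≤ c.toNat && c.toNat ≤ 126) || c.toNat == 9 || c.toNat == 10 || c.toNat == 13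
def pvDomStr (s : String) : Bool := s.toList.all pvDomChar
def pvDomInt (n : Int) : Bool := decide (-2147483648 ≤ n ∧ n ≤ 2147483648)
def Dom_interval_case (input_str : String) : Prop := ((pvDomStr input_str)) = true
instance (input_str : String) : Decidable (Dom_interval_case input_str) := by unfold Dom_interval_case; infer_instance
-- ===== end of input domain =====

-- B restyles the alpha subsequence by its own even/odd position and merges it back, instead of
-- A's fused single-pass upper/lower toggle; alternative decomposition, same O(n) cost.


-- ===== PORT A =====
-- for char in input_str: toggle a bool on alpha chars, append the cased char; join at the end
def interval_case (input_str : String) : String :=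
  let final := input_str.toList.foldl
    (fun (st : List Char × Bool) c =>
      if PySem.Chars.isalpha c then
        (st.1 ++ [if st.2 then PySem.Chars.upperChar c else PySem.Chars.lowerChar c], !st.2)
      else
        (st.1 ++ [c], st.2))
    ([], true)
  String.ofList final.1

-- ===== PORT B =====
-- ''.join(next(styled) if c.isalpha() else c for c in input_str): the generator `styled` is
-- consumed in order, so it is ported as recursion eating the styled list; the `[]` branch under
-- an alpha char is unreachable (styled has exactly one entry per alpha char of input_str).
def ivMerge : List Char → List Char → List Char
  | [], _ => []
  | c :: cs, ts =>
    if PySem.Chars.isalpha c then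
      match ts with
      | t :: ts' => t :: ivMerge cs ts'
      | [] => []
    else c :: ivMerge cs ts

def interval_case_alt (input_str : String) : String :=
  let alphas := input_str.toList.filter (fun c => PySem.Chars.isalpha c)
  let styled := (PySem.List.enumerate alphas 0).map
    (fun p => if PySem.Int.mod p.1 2 = 0 then PySem.Chars.upperChar p.2 else PySem.Chars.lowerChar p.2)
  String.ofList (ivMerge input_str.toList styled)

-- ===== PRECONDITION & SPEC =====
def Spec_interval_case (input_str : String) (out : String) : Prop := out = interval_case_alt input_str
instance (input_str : String) (out : String) : Decidable (Spec_interval_case input_str out) := by unfold Spec_interval_case; infer_instance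

-- ===== CLAIM (what is proved, stated in full; the proofs are below) =====
def Claim_equal_interval_case : Prop := ∀ (input_str : String), Dom_interval_case input_str → Spec_interval_case input_str (interval_case input_str)

-- ===== LEMMAS AND PROOFS =====

-- common reference: process chars with an explicit upper/lower flag
def ivSpec : List Char → Bool → List Char
  | [], _ => []
  | c :: cs, up =>
    if PySem.Chars.isalpha c then
      (if up then PySem.Chars.upperChar c else PySem.Chars.lowerChar c) :: ivSpec cs (!up)
    else c :: ivSpec cs up

lemma ivA_fold (cs : List Char) : ∀ (acc : List Char) (up : Bool),
    (cs.foldl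
      (fun (st : List Char × Bool) c =>
        if PySem.Chars.isalpha c then
          (st.1 ++ [if st.2 then PySem.Chars.upperChar c else PySem.Chars.lowerChar c], !st.2)
        else
          (st.1 ++ [c], st.2))
      (acc, up)).1 = acc ++ ivSpec cs up := by
  induction cs with
  | nil => intro acc up; simp [ivSpec]
  | cons c cs ih =>
    intro acc up
    by_cases h : PySem.Chars.isalpha c = true <;>
      simp [List.foldl_cons, h, ih, ivSpec]

lemma ivB_merge (cs : List Char) : ∀ (k : Int), 0 ≤ k →
    ivMerge cs (((PySem.List.enumerate (cs.filter (fun c => PySem.Chars.isalpha c)) k)).map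
      (fun p => if PySem.Int.mod p.1 2 = 0 then PySem.Chars.upperChar p.2 else PySem.Chars.lowerChar p.2))
      = ivSpec cs (decide (PySem.Int.mod k 2 = 0)) := by
  induction cs with
  | nil => intro k hk; simp [ivMerge, ivSpec]
  | cons c cs ih =>
    intro k hk
    by_cases h : PySem.Chars.isalpha c = true
    · have hpar : (decide (PySem.Int.mod (k + 1) 2 = 0)) = !(decide (PySem.Int.mod k 2 = 0)) := by
        rw [PySem.Int.mod_eq_emod_of_pos (by omega : (0:Int) < 2),
            PySem.Int.mod_eq_emod_of_pos (by omega : (0:Int) < 2)]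
        rcases Int.emod_two_eq k with h2 | h2 <;> simp [h2] <;> omega
      have ih' := ih (k + 1) (by omega)
      simp only [List.filter_cons, h, if_pos, PySem.List.enumerate_cons, List.map_cons,
        ivMerge, ivSpec, hpar] at ih' ⊢
      rw [ih']
      by_cases hk2 : PySem.Int.mod k 2 = 0 <;> simp
    · simp only [List.filter_cons, h, Bool.false_eq_true, if_false, ivMerge, ivSpec]
      rw [ih k hk]

-- ===== VERDICT (by name: the statement is the Claim_ definition above) =====
theorem interval_case_spec : Claim_equal_interval_case := by
  intro s _
  show _ = _
  unfold interval_case interval_case_alt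
  have hA := ivA_fold s.toList [] true
  have hB := ivB_merge s.toList 0 (by omega)
  simp only [hA, List.nil_append]
  simp only [show PySem.Int.mod 0 2 = 0 from by decide, decide_true] at hB
  rw [hB]
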